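-- pv_equiv track=rewrite | github.com/akohen/AdventOfCode | aoc_2023/day8.py | part2
-- ===== SOURCE A (Python) =====
-- from math import lcm
--
-- def part2(instr, network):
--     curr = [node for node in network.keys() if node[-1] == 'A']
--     step = [0] * len(curr)
--     for i in range(len(curr)):
--         while curr[i][-1] != 'Z':
--             curr[i] = network[curr[i]][0 if instr[step[i]%len(instr)] == 'L' else 1]
--             step[i] += 1
--     return lcm(*step)
-- ===== SOURCE B (Python) =====
-- from math import lcm
--
-- def part2(instr, network):
--     # Lockstep simulation: advance all ghosts together with one global step
--     # counter; record a ghost's step count the moment its node ends in 'Z'.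
--     active = [node for node in network if node[-1] == 'A']
--     results = []
--     t = 0
--     while active:
--         still = []
--         for node in active:
--             if node[-1] == 'Z':
--                 results.append(t)
--             else:
--                 still.append(network[node][0 if instr[t % len(instr)] == 'L' else 1])
--         active = still
--         t += 1
--     return lcm(*results)
-- ===== Notes on version B (the rewrite author's own statement) =====
-- stated objective: alternative
-- what changed: Instead of walking each ghost to completion one after another (per-ghost while-loop with per-ghost step counters), B runs one lockstep simulation with a single global step counter, advancing all active ghosts together and recording a ghost's step count the moment its node ends in 'Z'; the LCM is taken of the finish times in finishing order (LCM is order-independent).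
import Mathlib
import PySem

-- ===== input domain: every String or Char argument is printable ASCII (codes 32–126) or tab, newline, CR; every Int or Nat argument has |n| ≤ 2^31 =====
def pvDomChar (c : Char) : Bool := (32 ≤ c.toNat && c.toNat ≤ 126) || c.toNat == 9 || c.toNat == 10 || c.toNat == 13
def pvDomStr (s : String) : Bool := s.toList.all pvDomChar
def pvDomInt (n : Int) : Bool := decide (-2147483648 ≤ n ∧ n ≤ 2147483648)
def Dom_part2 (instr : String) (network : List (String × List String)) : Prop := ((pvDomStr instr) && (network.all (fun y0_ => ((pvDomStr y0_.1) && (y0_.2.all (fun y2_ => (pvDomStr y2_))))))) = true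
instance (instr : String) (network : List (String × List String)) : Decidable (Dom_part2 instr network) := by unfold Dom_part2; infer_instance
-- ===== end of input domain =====

-- B replaces A's one-ghost-at-a-time walk by a lockstep simulation of all ghosts with a
-- single global step counter (alternative decomposition, same cost; return values proved equal).

-- ===== PORT A =====
-- node[-1] == c  (Python raises IndexError on "", excluded by Pre_)
def pvEndsC (c : Char) (n : String) : Bool := PySem.Str.pyGet? n (-1) == some c

-- network[n][0 if instr[t % len(instr)] == 'L' else 1]; getD defaults are exact under Pre_
-- (n is a key, successor lists have length ≥ 2, instr nonempty when any ghost walks).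
def pvNext (instr : String) (d : PySem.Dict String (List String)) (t : Nat) (n : String) : String :=
  (PySem.Dict.getD d n []).getD (if (instr.toList).getD (t % instr.toList.length) 'R' = 'L' then 0 else 1) ""

-- A's inner while-loop; fuel makes it total, Pre_ guarantees the fuel suffices.
def pvWalkA (instr : String) (d : PySem.Dict String (List String)) : Nat → String → Nat → Nat
  | 0, _, s => s
  | f + 1, n, s => if pvEndsC 'Z' n then s else pvWalkA instr d f (pvNext instr d s n) (s + 1)

def part2 (instr : String) (network : List (String × List String)) : Int :=
  let d := PySem.Dict.ofList network
  let curr := (PySem.Dict.keys d).filter (pvEndsC 'A')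
  let fuel := network.length * instr.toList.length + 1
  let step := curr.map (fun n => pvWalkA instr d fuel n 0)
  ((step.foldl Nat.lcm 1 : Nat) : Int)

-- ===== PORT B =====
-- one round of the lockstep loop: the for-loop over the active ghosts
def pvRound (instr : String) (d : PySem.Dict String (List String)) (t : Nat)
    (active : List String) (acc : List Nat × List String) : List Nat × List String :=
  active.foldl
    (fun p node =>
      if pvEndsC 'Z' node then (p.1 ++ [t], p.2) else (p.1, p.2 ++ [pvNext instr d t node]))
    acc

-- B's outer while-loop; fuel makes it total, Pre_ guarantees the fuel suffices.
def pvLock (instr : String) (d : PySem.Dict String (List String)) :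
    Nat → Nat → List String → List Nat → List Nat
  | 0, _, _, res => res
  | f + 1, t, active, res =>
    if active.isEmpty then res
    else
      let p := pvRound instr d t active (res, [])
      pvLock instr d f (t + 1) p.2 p.1

def part2_alt (instr : String) (network : List (String × List String)) : Int :=
  let d := PySem.Dict.ofList network
  let active := (PySem.Dict.keys d).filter (pvEndsC 'A')
  let fuel := network.length * instr.toList.length + 2
  let results := pvLock instr d fuel 0 active []
  ((results.foldl Nat.lcm 1 : Nat) : Int)

-- ===== PRECONDITION & SPEC =====
-- spec-level walk: node after k steps starting at time t (used only by Pre_)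
def pvIter (instr : String) (d : PySem.Dict String (List String)) : Nat → Nat → String → String
  | _, 0, n => n
  | t, k + 1, n => pvIter instr d (t + 1) k (pvNext instr d t n)

-- Pre_ excludes exactly the inputs on which A raises or diverges: an empty key name
-- (IndexError in the comprehension), an empty instruction string while a ghost must walk
-- (ZeroDivisionError), and, along each ghost's walk up to its first 'Z' node, a missing key
-- (KeyError), a too-short successor list (IndexError), an empty node name (IndexError),
-- or a ghost that never reaches a node ending in 'Z' (A diverges; if it finishes at all it
-- finishes within len(network)*len(instr) steps, since the walk is deterministic per
-- (node, instruction-position) state).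
def Pre_part2 (instr : String) (network : List (String × List String)) : Prop :=
  (∀ p ∈ network, p.1 ≠ "") ∧
  ((PySem.Dict.keys (PySem.Dict.ofList network)).filter (pvEndsC 'A') = [] ∨ instr ≠ "") ∧
  (∀ s ∈ (PySem.Dict.keys (PySem.Dict.ofList network)).filter (pvEndsC 'A'),
    ∃ k ≤ network.length * instr.toList.length,
      pvEndsC 'Z' (pvIter instr (PySem.Dict.ofList network) 0 k s) = true ∧
      (∀ j ≤ k, pvIter instr (PySem.Dict.ofList network) 0 j s ≠ "") ∧
      (∀ j < k,
        (PySem.Dict.get? (PySem.Dict.ofList network)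
            (pvIter instr (PySem.Dict.ofList network) 0 j s)).isSome ∧
        (if (instr.toList).getD (j % instr.toList.length) 'R' = 'L' then 0 else 1) <
          (PySem.Dict.getD (PySem.Dict.ofList network)
            (pvIter instr (PySem.Dict.ofList network) 0 j s) []).length))

instance (instr : String) (network : List (String × List String)) : Decidable (Pre_part2 instr network) := by
  unfold Pre_part2; infer_instance

def pvWitness_part2 : String × (List (String × List String)) :=
  ("L", [("AA", ["AZ", "AZ"]), ("AZ", ["AZ", "AZ"])])

def Spec_part2 (instr : String) (network : List (String × List String)) (out : Int) : Prop := out = part2_alt instr network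
instance (instr : String) (network : List (String × List String)) (out : Int) : Decidable (Spec_part2 instr network out) := by unfold Spec_part2; infer_instance

-- ===== CLAIM (what is proved, stated in full; the proofs are below) =====
def Claim_equal_part2 : Prop := ∀ (instr : String) (network : List (String × List String)), Dom_part2 instr network → Pre_part2 instr network → Spec_part2 instr network (part2 instr network)

-- ===== LEMMAS AND PROOFS =====

-- A's while-loop computes t + k where k is the first time the walk from (n, t) hits a 'Z' node.
theorem pvWalkA_eq_of_first {instr : String} {d : PySem.Dict String (List String)} :
    ∀ (k f t : Nat) (n : String), k ≤ f →
      pvEndsC 'Z' (pvIter instr d t k n) = true →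
      (∀ j < k, ¬ pvEndsC 'Z' (pvIter instr d t j n) = true) →
      pvWalkA instr d f n t = t + k := by
  intro k
  induction k with
  | zero =>
    intro f t n _ hz _
    cases f with
    | zero => simp [pvWalkA]
    | succ f => simp only [pvWalkA]; rw [if_pos (by simpa [pvIter] using hz)]; omega
  | succ k ih =>
    intro f t n hkf hz hmin
    cases f with
    | zero => omega
    | succ f =>
      have h0 : ¬ pvEndsC 'Z' (pvIter instr d t 0 n) = true := hmin 0 (by omega)
      simp only [pvIter] at h0
      simp only [pvWalkA, if_neg h0]
      have := ih f (t + 1) (pvNext instr d t n) (by omega)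
        (by simpa [pvIter] using hz)
        (by intro j hj; have := hmin (j + 1) (by omega); simpa [pvIter] using this)
      omega

-- the for-loop over a round, in closed form
theorem pvRound_eq (instr : String) (d : PySem.Dict String (List String)) (t : Nat) :
    ∀ (active : List String) (res : List Nat) (still : List String),
      pvRound instr d t active (res, still) =
        (res ++ (active.filter (pvEndsC 'Z')).map (fun _ => t),
         still ++ (active.filter (fun n => ! pvEndsC 'Z' n)).map (pvNext instr d t)) := by
  intro active
  induction active with
  | nil => intro res still; simp [pvRound]
  | cons n active ih =>
    intro res still
    by_cases h : pvEndsC 'Z' n = true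
    · have h1 : pvRound instr d t (n :: active) (res, still) =
          pvRound instr d t active (res ++ [t], still) := by
        simp [pvRound, h]
      rw [h1, ih (res ++ [t]) still]
      simp [h, List.append_assoc]
    · have h1 : pvRound instr d t (n :: active) (res, still) =
          pvRound instr d t active (res, still ++ [pvNext instr d t n]) := by
        simp [pvRound, h]
      rw [h1, ih res (still ++ [pvNext instr d t n])]
      simp [h, List.append_assoc]

-- one unfolding of the nonempty case of the lockstep loop
theorem pvLock_succ (instr : String) (d : PySem.Dict String (List String))
    (f t : Nat) (active : List String) (res : List Nat) (hae : active.isEmpty = false) :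
    pvLock instr d (f + 1) t active res =
      pvLock instr d f (t + 1)
        ((active.filter (fun n => ! pvEndsC 'Z' n)).map (pvNext instr d t))
        (res ++ (active.filter (pvEndsC 'Z')).map (fun _ => t)) := by
  conv_lhs => rw [pvLock]
  rw [pvRound_eq]
  simp [hae]

-- results only ever grow: the accumulator is a prefix of the loop's value
theorem pvLock_append (instr : String) (d : PySem.Dict String (List String)) :
    ∀ (f t : Nat) (active : List String) (res : List Nat),
      pvLock instr d f t active res = res ++ pvLock instr d f t active [] := by
  intro f
  induction f with
  | zero => intro t active res; simp [pvLock]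
  | succ f ih =>
    intro t active res
    cases hae : active.isEmpty with
    | true => rw [List.isEmpty_iff] at hae; subst hae; simp [pvLock]
    | false =>
      rw [pvLock_succ instr d f t active res hae, pvLock_succ instr d f t active [] hae,
          ih (t + 1) _ (res ++ (active.filter (pvEndsC 'Z')).map (fun _ => t)),
          ih (t + 1) _ ([] ++ (active.filter (pvEndsC 'Z')).map (fun _ => t))]
      simp [List.append_assoc]

-- the lockstep loop returns a permutation of the per-ghost finish times
theorem pvLock_perm {instr : String} {d : PySem.Dict String (List String)} :
    ∀ (f t : Nat) (active : List String),
      (∀ n ∈ active, ∃ k ≤ f, pvEndsC 'Z' (pvIter instr d t k n) = true) →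
      (pvLock instr d (f + 1) t active []).Perm
        (active.map (fun n => pvWalkA instr d (f + 1) n t)) := by
  intro f
  induction f with
  | zero =>
    intro t active h
    cases hae : active.isEmpty with
    | true =>
      rw [List.isEmpty_iff] at hae
      subst hae; simp [pvLock]
    | false =>
      have hall : ∀ n ∈ active, pvEndsC 'Z' n = true := by
        intro n hn
        obtain ⟨k, hk, hz⟩ := h n hn
        interval_cases k
        simpa [pvIter] using hz
      rw [pvLock_succ instr d 0 t active [] hae]
      have hfil : active.filter (pvEndsC 'Z') = active :=
        List.filter_eq_self.mpr hall
      have hfil2 : active.filter (fun n => ! pvEndsC 'Z' n) = [] := by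
        rw [List.filter_eq_nil_iff]; intro n hn; simp [hall n hn]
      rw [hfil, hfil2]
      simp only [List.nil_append, pvLock]
      have : active.map (fun _ => t) = active.map (fun n => pvWalkA instr d 1 n t) :=
        List.map_congr_left (fun n hn => by simp [pvWalkA, hall n hn])
      rw [← this]
  | succ f ih =>
    intro t active h
    cases hae : active.isEmpty with
    | true =>
      rw [List.isEmpty_iff] at hae
      subst hae; simp [pvLock]
    | false =>
      rw [pvLock_succ instr d (f + 1) t active [] hae, List.nil_append,
          pvLock_append instr d (f + 1) (t + 1)]
      have hstill : ∀ m ∈ (active.filter (fun n => ! pvEndsC 'Z' n)).map (pvNext instr d t),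
          ∃ k ≤ f, pvEndsC 'Z' (pvIter instr d (t + 1) k m) = true := by
        intro m hm
        obtain ⟨n, hn, rfl⟩ := List.mem_map.mp hm
        have hnz : ¬ pvEndsC 'Z' n = true := by
          have := List.of_mem_filter hn
          simpa using this
        obtain ⟨k, hk, hz⟩ := h n (List.mem_of_mem_filter hn)
        cases k with
        | zero => exact absurd (by simpa [pvIter] using hz) hnz
        | succ k => exact ⟨k, by omega, by simpa [pvIter] using hz⟩
      have hperm := ih (t + 1) ((active.filter (fun n => ! pvEndsC 'Z' n)).map (pvNext instr d t)) hstill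
      have hmapeq : ((active.filter (fun n => ! pvEndsC 'Z' n)).map (pvNext instr d t)).map
            (fun n => pvWalkA instr d (f + 1) n (t + 1)) =
          (active.filter (fun n => ! pvEndsC 'Z' n)).map (fun n => pvWalkA instr d (f + 1 + 1) n t) := by
        rw [List.map_map]
        refine List.map_congr_left (fun n hn => ?_)
        have hnz : ¬ pvEndsC 'Z' n = true := by
          have := List.of_mem_filter hn
          simpa using this
        simp [pvWalkA, if_neg hnz]
      have hfineq : (active.filter (pvEndsC 'Z')).map (fun _ => t) =
          (active.filter (pvEndsC 'Z')).map (fun n => pvWalkA instr d (f + 1 + 1) n t) := by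
        refine List.map_congr_left (fun n hn => ?_)
        have := List.of_mem_filter hn
        simp [pvWalkA, this]
      have h1 : ((active.filter (pvEndsC 'Z')).map (fun _ => t) ++
            pvLock instr d (f + 1) (t + 1) ((active.filter (fun n => ! pvEndsC 'Z' n)).map (pvNext instr d t)) []).Perm
          ((active.filter (pvEndsC 'Z')).map (fun n => pvWalkA instr d (f + 1 + 1) n t) ++
            (active.filter (fun n => ! pvEndsC 'Z' n)).map (fun n => pvWalkA instr d (f + 1 + 1) n t)) := by
        rw [← hfineq, ← hmapeq]
        exact hperm.append_left _
      have h2 : (((active.filter (pvEndsC 'Z')).map (fun n => pvWalkA instr d (f + 1 + 1) n t) ++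
            (active.filter (fun n => ! pvEndsC 'Z' n)).map (fun n => pvWalkA instr d (f + 1 + 1) n t))).Perm
          (active.map (fun n => pvWalkA instr d (f + 1 + 1) n t)) := by
        rw [← List.map_append]
        exact (List.filter_append_perm _ active).map _
      exact h1.trans h2

-- ===== VERDICT (by name: the statement is the Claim_ definition above) =====
theorem part2_spec : Claim_equal_part2 := by
  intro instr network _ hPre
  obtain ⟨-, -, hterm⟩ := hPre
  unfold Spec_part2 part2 part2_alt
  simp only []
  set d := PySem.Dict.ofList network with hd
  set starts := (PySem.Dict.keys d).filter (pvEndsC 'A') with hs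
  set K := network.length * instr.toList.length with hK
  have hmin : ∀ n ∈ starts, ∃ k0, k0 ≤ K ∧ pvEndsC 'Z' (pvIter instr d 0 k0 n) = true ∧
      ∀ j < k0, ¬ pvEndsC 'Z' (pvIter instr d 0 j n) = true := by
    intro n hn
    obtain ⟨k, hk, hz, -, -⟩ := hterm n hn
    have hex : ∃ j, pvEndsC 'Z' (pvIter instr d 0 j n) = true := ⟨k, hz⟩
    exact ⟨Nat.find hex, le_trans (Nat.find_min' hex hz) hk, Nat.find_spec hex,
      fun j hj => Nat.find_min hex hj⟩
  have hmapeq : starts.map (fun n => pvWalkA instr d (K + 1 + 1) n 0) =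
      starts.map (fun n => pvWalkA instr d (K + 1) n 0) := by
    refine List.map_congr_left (fun n hn => ?_)
    obtain ⟨k0, hk0, hz, hm⟩ := hmin n hn
    rw [pvWalkA_eq_of_first k0 (K + 1 + 1) 0 n (by omega) hz hm,
        pvWalkA_eq_of_first k0 (K + 1) 0 n (by omega) hz hm]
  have hperm := pvLock_perm (K + 1) 0 starts (fun n hn => by
    obtain ⟨k, hk, hz, -, -⟩ := hterm n hn; exact ⟨k, by omega, hz⟩)
  rw [hmapeq] at hperm
  have hfold : ((pvLock instr d (K + 1 + 1) 0 starts []).foldl Nat.lcm 1) =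
      ((starts.map (fun n => pvWalkA instr d (K + 1) n 0)).foldl Nat.lcm 1) :=
    List.Perm.foldl_op_eq hperm
  have : K + 2 = K + 1 + 1 := by omega
  rw [this, hfold]
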